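-- pv_equiv track=rewrite | github.com/AmberLee2427/chunky | src/chunky/chunkers/rst.py | _heading_marker
-- ===== SOURCE A (Python) =====
-- from typing import List, Optional, Set, Tuple
--
-- _RST_HEADING_CHARS = set("=-~^\"'`#*+:")
--
-- def _heading_marker(line: str) -> Optional[str]:
--     if not line:
--         return None
--     marker = line[0]
--     if marker not in _RST_HEADING_CHARS:
--         return None
--     if any(char != marker for char in line):
--         return None
--     return marker
-- ===== SOURCE B (Python) =====
-- from typing import Optional
--
-- _RST_HEADING_CHARS = set("=-~^\"'`#*+:")
--
-- def _heading_marker(line: str) -> Optional[str]: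
--     chars = set(line)
--     if len(chars) == 1:
--         marker = next(iter(chars))
--         if marker in _RST_HEADING_CHARS:
--             return marker
--     return None
-- ===== Notes on version B (the rewrite author's own statement) =====
-- stated objective: simpler
-- what changed: Replaces the empty-guard + first-char extraction + any()-scan control flow with a single distinct-character-set computation: the line is collapsed to set(line) and the answer is decided by whether that set is a singleton whose element is a heading character.
import Mathlib
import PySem

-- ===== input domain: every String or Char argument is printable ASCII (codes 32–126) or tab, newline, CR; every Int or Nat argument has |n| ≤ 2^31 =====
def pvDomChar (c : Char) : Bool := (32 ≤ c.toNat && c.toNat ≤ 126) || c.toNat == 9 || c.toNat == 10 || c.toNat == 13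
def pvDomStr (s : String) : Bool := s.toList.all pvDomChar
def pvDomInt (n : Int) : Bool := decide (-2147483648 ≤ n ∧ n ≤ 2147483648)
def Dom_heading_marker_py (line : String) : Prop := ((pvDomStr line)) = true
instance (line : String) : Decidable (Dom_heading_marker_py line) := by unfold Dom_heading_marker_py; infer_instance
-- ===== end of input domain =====

-- B replaces A's empty-guard / first-char / any()-scan with a distinct-character-set
-- (set(line)) singleton decision; same O(n) cost, simpler control flow.

-- _RST_HEADING_CHARS = set("=-~^\"'`#*+:")
def rstHeadingChars : PySem.Set Char := PySem.Set.ofList "=-~^\"'`#*+:".toList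

-- ===== PORT A =====
def heading_marker_py (line : String) : Option String :=
  match line.toList with
  | [] => none                           -- if not line: return None
  | marker :: _ =>
    if !(rstHeadingChars.contains marker) then none     -- marker not in _RST_HEADING_CHARS
    else if line.toList.any (fun c => c != marker) then none  -- any(char != marker for char in line)
    else some (String.ofList [marker])

-- ===== PORT B =====
def heading_marker_py_alt (line : String) : Option String :=
  match PySem.Set.ofList line.toList with      -- chars = set(line)
  | [c] =>                                     -- len(chars) == 1; c = next(iter(chars))
    if rstHeadingChars.contains c then some (String.ofList [c]) else none
  | _ => none

-- ===== PRECONDITION & SPEC =====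
def Spec_heading_marker_py (line : String) (out : Option String) : Prop := out = heading_marker_py_alt line
instance (line : String) (out : Option String) : Decidable (Spec_heading_marker_py line out) := by unfold Spec_heading_marker_py; infer_instance

-- ===== CLAIM (what is proved, stated in full; the proofs are below) =====
def Claim_equal_heading_marker_py : Prop := ∀ (line : String), Dom_heading_marker_py line → Spec_heading_marker_py line (heading_marker_py line)

-- ===== LEMMAS AND PROOFS =====

-- a fold of Set.add over elements all equal to m leaves [m] unchanged
lemma foldl_add_const (m : Char) : ∀ (rest : List Char), (∀ x ∈ rest, x = m) →
    List.foldl PySem.Set.add [m] rest = [m] := by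
  intro rest
  induction rest with
  | nil => intro _; rfl
  | cons x rs ih =>
    intro h
    have hx : x = m := h x (by simp)
    subst hx
    have : PySem.Set.add [x] x = [x] := by simp [PySem.Set.add]
    simpa [List.foldl, this] using ih (fun y hy => h y (by simp [hy]))

lemma ofList_all_eq (m : Char) (rest : List Char) (h : ∀ x ∈ rest, x = m) :
    PySem.Set.ofList (m :: rest) = [m] := by
  have : PySem.Set.ofList (m :: rest)
      = List.foldl PySem.Set.add (PySem.Set.add PySem.Set.empty m) rest := rfl
  rw [this]
  have he : PySem.Set.add PySem.Set.empty m = [m] := by simp [PySem.Set.add, PySem.Set.empty]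
  rw [he]
  exact foldl_add_const m rest h

lemma main_eq (line : String) : heading_marker_py line = heading_marker_py_alt line := by
  unfold heading_marker_py heading_marker_py_alt
  cases hl : line.toList with
  | nil => rfl
  | cons m rest =>
    by_cases hall : ∀ x ∈ rest, x = m
    · -- uniform line: set(line) = {m}
      rw [ofList_all_eq m rest hall]
      have hany : (m :: rest).any (fun c => c != m) = false := by
        simp only [List.any_eq_false]
        intro x hx
        rcases hx with _ | hx
        · simp
        · simp [hall x (by assumption)]
      by_cases hc : rstHeadingChars.contains m = true
      · simp [hany, hc]
      · simp [hany, hc]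
    · -- mixed line: set(line) has ≥ 2 distinct members; A's any() fires
      push Not at hall
      obtain ⟨x, hx, hxm⟩ := hall
      have hany : (m :: rest).any (fun c => c != m) = true := by
        simp only [List.any_eq_true]
        exact ⟨x, by simp [hx], by simp [hxm]⟩
      have hnot : ∀ c, PySem.Set.ofList (m :: rest) ≠ [c] := by
        intro c hc
        have hm : m ∈ PySem.Set.ofList (m :: rest) := by
          rw [PySem.Set.mem_ofList]; simp
        have hxmem : x ∈ PySem.Set.ofList (m :: rest) := by
          rw [PySem.Set.mem_ofList]; simp [hx]
        rw [hc] at hm hxmem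
        simp at hm hxmem
        exact hxm (hxmem.trans hm.symm)
      cases hs : PySem.Set.ofList (m :: rest) with
      | nil => simp [hany]
      | cons c cs =>
        cases cs with
        | nil => exact absurd hs (hnot c)
        | cons d ds => simp [hany]

-- ===== VERDICT (by name: the statement is the Claim_ definition above) =====
theorem heading_marker_py_spec : Claim_equal_heading_marker_py := by
  intro line _
  unfold Spec_heading_marker_py
  exact main_eq line
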